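-- pv_equiv track=rewrite | github.com/CaptainIRS/sharded-kvs | server.py | findDestinationServer
-- ===== SOURCE A (Python) =====
-- ring_hashing_mod = 360
--
-- server_list = {
--     360 : "localhost:5051",
--     90 : "localhost:6051",
--     180 : "localhost:7051",
--     270 : "localhost:8051"
-- }
--
-- def findDestinationServer(key):
--     server_index = None
--     server_address = None
--     try:
--         new_key = int(key) % ring_hashing_mod
--         for dict_key in server_list:
--             if dict_key > new_key:
--                 if server_index is None or dict_key < server_index:
--                     server_index = dict_key
--
--         if server_index is not None:
--             server_address = server_list[server_index]
--
--         return server_index,server_address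
--     except ValueError:
--         return server_index,server_address
-- ===== SOURCE B (Python) =====
-- import bisect
--
-- ring_hashing_mod = 360
--
-- server_list = {
--     360 : "localhost:5051",
--     90 : "localhost:6051",
--     180 : "localhost:7051",
--     270 : "localhost:8051"
-- }
--
-- _sorted_keys = sorted(server_list)
--
-- def findDestinationServer(key):
--     try:
--         new_key = int(key) % ring_hashing_mod
--     except ValueError:
--         return None, None
--     i = bisect.bisect_right(_sorted_keys, new_key)
--     if i == len(_sorted_keys):
--         return None, None
--     server_index = _sorted_keys[i]
--     return server_index, server_list[server_index]
-- ===== Notes on version B (the rewrite author's own statement) =====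
-- stated objective: idiomatic
-- what changed: Replaces A's linear scan keeping a running minimum-key-above-hash over the dict with a one-time sorted key list and a bisect_right successor lookup.
import Mathlib
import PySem

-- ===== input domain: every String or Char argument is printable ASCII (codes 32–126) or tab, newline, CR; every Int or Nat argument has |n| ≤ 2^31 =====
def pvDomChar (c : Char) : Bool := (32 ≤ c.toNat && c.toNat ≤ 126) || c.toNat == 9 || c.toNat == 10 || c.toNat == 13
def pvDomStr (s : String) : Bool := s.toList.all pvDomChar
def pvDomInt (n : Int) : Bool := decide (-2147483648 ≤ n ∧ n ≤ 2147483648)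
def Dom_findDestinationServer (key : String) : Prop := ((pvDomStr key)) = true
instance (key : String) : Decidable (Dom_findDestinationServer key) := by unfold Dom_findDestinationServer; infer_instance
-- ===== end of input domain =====

-- B replaces A's linear scan for the minimal ring key above the hash by one
-- bisect_right on the sorted ring keys (alternative decomposition, same cost on this fixed ring).

def ringHashingMod : Int := 360

def serverList : PySem.Dict Int String :=
  PySem.Dict.ofList [(360, "localhost:5051"), (90, "localhost:6051"),
                     (180, "localhost:7051"), (270, "localhost:8051")]

-- ===== PORT A =====
def findDestinationServer (key : String) : Option Int × Option String :=
  match PySem.Int.ofStr? key with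
  | none => (none, none)          -- ValueError: both variables still None
  | some k =>
    let newKey := PySem.Int.mod k ringHashingMod
    let serverIndex := serverList.keys.foldl (fun si dictKey =>
      if dictKey > newKey then
        match si with
        | none => some dictKey
        | some s => if dictKey < s then some dictKey else si
      else si) none
    let serverAddress := match serverIndex with
      | none => none
      | some i => serverList.get? i
    (serverIndex, serverAddress)

-- ===== PORT B =====
def sortedKeys : List Int := PySem.List.sorted serverList.keys (fun x => x) false

def findDestinationServer_alt (key : String) : Option Int × Option String :=
  match PySem.Int.ofStr? key with
  | none => (none, none)
  | some k =>
    let newKey := PySem.Int.mod k ringHashingMod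
    let i := PySem.List.bisectRight sortedKeys newKey
    if h : i < sortedKeys.length then
      let serverIndex := sortedKeys[i]
      (some serverIndex, serverList.get? serverIndex)
    else (none, none)

-- ===== PRECONDITION & SPEC =====
def Spec_findDestinationServer (key : String) (out : Option Int × Option String) : Prop := out = findDestinationServer_alt key
instance (key : String) (out : Option Int × Option String) : Decidable (Spec_findDestinationServer key out) := by unfold Spec_findDestinationServer; infer_instance

-- ===== CLAIM (what is proved, stated in full; the proofs are below) =====
def Claim_equal_findDestinationServer : Prop := ∀ (key : String), Dom_findDestinationServer key → Spec_findDestinationServer key (findDestinationServer key)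

-- ===== LEMMAS AND PROOFS =====

lemma keys_eq : serverList.keys = [360, 90, 180, 270] := by decide

lemma bis_eq (m : Int) (h0 : 0 ≤ m) (h1 : m < 360) :
    PySem.List.bisectRight [90, 180, 270, 360] m =
      if m < 90 then 0 else if m < 180 then 1 else if m < 270 then 2 else 3 := by
  obtain ⟨hle, hlo, hhi⟩ := PySem.List.bisectRight_spec [90, 180, 270, 360] m (by decide)
  set i := PySem.List.bisectRight [90, 180, 270, 360] m with hi
  simp only [List.length_cons, List.length_nil] at hle hlo hhi
  split_ifs with c1 c2 c3
  · rcases Nat.lt_or_ge i 1 with h | h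
    · omega
    · have := hlo 0 (by omega) (by omega); simp at this; omega
  · rcases Nat.lt_or_ge i 1 with h | h
    · have := hhi 0 (by omega) (by omega); simp at this; omega
    · rcases Nat.lt_or_ge i 2 with h2 | h2
      · omega
      · have := hlo 1 (by omega) (by omega); simp at this; omega
  · rcases Nat.lt_or_ge i 2 with h | h
    · have := hhi 1 (by omega) (by omega); simp at this; omega
    · rcases Nat.lt_or_ge i 3 with h2 | h2
      · omega
      · have := hlo 2 (by omega) (by omega); simp at this; omega
  · rcases Nat.lt_or_ge i 3 with h | h
    · have := hhi 2 (by omega) (by omega); simp at this; omega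
    · rcases Nat.lt_or_ge i 4 with h2 | h2
      · omega
      · have := hlo 3 (by omega) (by omega); simp at this; omega

lemma body_eq (m : Int) (h0 : 0 ≤ m) (h1 : m < 360) :
    (let serverIndex := serverList.keys.foldl (fun si dictKey =>
        if dictKey > m then
          match si with
          | none => some dictKey
          | some s => if dictKey < s then some dictKey else si
        else si) none
      let serverAddress := match serverIndex with
        | none => none
        | some i => serverList.get? i
      ((serverIndex, serverAddress) : Option Int × Option String)) =
    (let i := PySem.List.bisectRight sortedKeys m
      if h : i < sortedKeys.length then
        (some sortedKeys[i], serverList.get? sortedKeys[i])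
      else (none, none)) := by
  have hs : sortedKeys = [90, 180, 270, 360] := by decide
  rw [keys_eq]
  simp only [hs, bis_eq m h0 h1, List.foldl_cons, List.foldl_nil]
  by_cases c1 : m < 90
  · simp [c1, show m < 180 by omega, show m < 270 by omega, show m < 360 by omega]
  · by_cases c2 : m < 180
    · simp [c1, c2, show m < 270 by omega, show m < 360 by omega]
    · by_cases c3 : m < 270
      · simp [c1, c2, c3, show m < 360 by omega]
      · simp [c1, c2, c3, show m < 360 by omega]

-- ===== VERDICT (by name: the statement is the Claim_ definition above) =====
theorem findDestinationServer_spec : Claim_equal_findDestinationServer := by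
  intro key _
  unfold Spec_findDestinationServer findDestinationServer findDestinationServer_alt
  cases h : PySem.Int.ofStr? key with
  | none => simp
  | some k =>
    exact body_eq (PySem.Int.mod k ringHashingMod)
      (PySem.Int.mod_nonneg _ (by norm_num [ringHashingMod]))
      (PySem.Int.mod_lt _ (by norm_num [ringHashingMod]))
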